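-- pv_equiv track=rewrite | github.com/mr-martian/simple-asr | easy_asr/__init__.py | clean_text_unicode
-- ===== SOURCE A (Python) =====
-- from typing import Any, Dict, List, Optional, Tuple, Sequence, Set, Union
-- import unicodedata
--
-- def clean_text_unicode(text: str,
--                        charactersToKeep: Optional[Sequence[str]] = None,
--                        codeSwitchSymbol: str = '[C]',
--                        useCodeSwitchData: bool = True,
--                        doubtfulSymbol: str = '[D]',
--                        useDoubtfulData: bool = True) -> str:
--     '''Strip non-word characters from `text` based on Unicode character classes
--     `charactersToKeep`: a list of punctuation characters to retain
--     `codeSwitchSymbol`: symbol which indicates that `text` contains codeswitching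
--     `useCodeSwitchData`: whether codeswitched data should be included in training
--     `doubtfulSymbol`: symbol which indicates that `text` is uncertain
--     `useDoubtfulData`: where doubtful data should be included in training
--
--     The marker symbols will be removed from `text`. If either marker is present
--     and the corresponding flag is False, the function will return an empty
--     string.
--     '''
--     s = text
--     if codeSwitchSymbol in s:
--         if useCodeSwitchData:
--             s = s.replace(codeSwitchSymbol, '')
--         else:
--             return ''
--     if doubtfulSymbol in s:
--         if useDoubtfulData:
--             s = s.replace(doubtfulSymbol, '')
--         else:
--             return ''
--     ls = []
--     cset = set(charactersToKeep or '')
--     tset = set(['Ll', 'Lm', 'Lo', 'Lt', 'Lu', 'Mn', 'Nd', 'Nl', 'No'])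
--     for c in s:
--         typ = unicodedata.category(c)
--         if c in cset or typ in tset:
--             ls.append(c)
--         else:
--             ls.append(' ')
--     return ' '.join(''.join(ls).split())
-- ===== SOURCE B (Python) =====
-- from typing import Optional, Sequence
-- import unicodedata
--
-- def clean_text_unicode(text: str,
--                        charactersToKeep: Optional[Sequence[str]] = None,
--                        codeSwitchSymbol: str = '[C]',
--                        useCodeSwitchData: bool = True,
--                        doubtfulSymbol: str = '[D]',
--                        useDoubtfulData: bool = True) -> str:
--     s = text
--     if codeSwitchSymbol in s:
--         if not useCodeSwitchData:
--             return ''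
--         s = s.replace(codeSwitchSymbol, '')
--     if doubtfulSymbol in s:
--         if not useDoubtfulData:
--             return ''
--         s = s.replace(doubtfulSymbol, '')
--     keep = set(charactersToKeep) if charactersToKeep else set()
--     words = []
--     buf = []
--     for c in s:
--         # any whitespace char is a word boundary (even a "kept" one: A's
--         # final split() would break on it anyway)
--         if not c.isspace() and (c in keep or unicodedata.category(c) in
--                                 ('Ll', 'Lm', 'Lo', 'Lt', 'Lu', 'Mn', 'Nd', 'Nl', 'No')):
--             buf.append(c)
--         else:
--             if buf:
--                 words.append(''.join(buf))
--                 buf = []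
--     if buf:
--         words.append(''.join(buf))
--     return ' '.join(words)
-- ===== Notes on version B (the rewrite author's own statement) =====
-- stated objective: alternative
-- what changed: B builds words directly in one pass with a current-word buffer (treating any whitespace char as a boundary), instead of A's map-to-spaces list, join, split and re-join.
import Mathlib
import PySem

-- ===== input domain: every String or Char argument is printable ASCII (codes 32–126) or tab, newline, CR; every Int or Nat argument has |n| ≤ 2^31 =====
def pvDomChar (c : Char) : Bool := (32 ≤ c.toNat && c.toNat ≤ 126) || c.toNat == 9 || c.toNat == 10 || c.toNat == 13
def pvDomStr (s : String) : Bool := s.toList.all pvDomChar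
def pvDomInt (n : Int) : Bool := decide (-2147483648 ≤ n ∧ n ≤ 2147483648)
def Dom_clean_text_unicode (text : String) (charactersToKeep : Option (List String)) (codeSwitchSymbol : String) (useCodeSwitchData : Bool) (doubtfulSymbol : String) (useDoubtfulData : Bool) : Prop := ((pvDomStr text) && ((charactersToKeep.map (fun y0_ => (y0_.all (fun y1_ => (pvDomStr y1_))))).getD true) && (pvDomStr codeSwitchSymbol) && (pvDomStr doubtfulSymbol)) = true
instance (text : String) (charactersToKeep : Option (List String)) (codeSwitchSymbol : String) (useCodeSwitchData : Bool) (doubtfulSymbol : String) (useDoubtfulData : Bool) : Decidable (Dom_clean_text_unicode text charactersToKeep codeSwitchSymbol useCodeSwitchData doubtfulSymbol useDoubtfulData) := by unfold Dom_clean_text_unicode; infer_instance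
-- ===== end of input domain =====

-- B builds the words directly in one pass with a current-word buffer instead of A's
-- map-to-spaces / join / split / re-join; same cost, different decomposition.

-- shared helper = the `unicodedata.category(c)` call of both Pythons:
-- exact for ASCII 32-126 and tab/LF/CR (the stated input domain); "Cn" elsewhere
def pyCategory (c : Char) : String :=
  let n := c.toNat
  if 97 ≤ n ∧ n ≤ 122 then "Ll"
  else if 65 ≤ n ∧ n ≤ 90 then "Lu"
  else if 48 ≤ n ∧ n ≤ 57 then "Nd"
  else if n = 32 then "Zs"
  else if n < 32 ∨ n = 127 then "Cc"
  else if c = '(' ∨ c = '[' ∨ c = '{' then "Ps"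
  else if c = ')' ∨ c = ']' ∨ c = '}' then "Pe"
  else if c = '+' ∨ c = '<' ∨ c = '=' ∨ c = '>' ∨ c = '|' ∨ c = '~' then "Sm"
  else if c = '$' then "Sc"
  else if c = '^' ∨ c = '`' then "Sk"
  else if c = '-' then "Pd"
  else if c = '_' then "Pc"
  else if n ≤ 126 then "Po"
  else "Cn"

-- ===== PORT A =====
-- the part of A after the marker prologue: build `ls` (kept char or ' '), join, split, re-join
def ctuTailA (s : String) (charactersToKeep : Option (List String)) : String :=
  let cset : PySem.Set String := PySem.Set.ofList (charactersToKeep.getD [])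
  let tset : PySem.Set String := PySem.Set.ofList ["Ll", "Lm", "Lo", "Lt", "Lu", "Mn", "Nd", "Nl", "No"]
  let ls : List Char := s.toList.foldl (fun ls c =>
    let typ := pyCategory c
    if PySem.Set.contains cset (String.singleton c) || PySem.Set.contains tset typ
    then ls ++ [c] else ls ++ [' ']) []
  PySem.Str.join " " (PySem.Str.split₀ (String.ofList ls))

-- the second `if` of the prologue, then the tail
def ctuStep2A (s : String) (charactersToKeep : Option (List String)) (doubtfulSymbol : String) (useDoubtfulData : Bool) : String :=
  if PySem.Str.isIn doubtfulSymbol s then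
    if useDoubtfulData then ctuTailA (PySem.Str.replace s doubtfulSymbol "") charactersToKeep
    else ""
  else ctuTailA s charactersToKeep

def clean_text_unicode (text : String) (charactersToKeep : Option (List String)) (codeSwitchSymbol : String) (useCodeSwitchData : Bool) (doubtfulSymbol : String) (useDoubtfulData : Bool) : String :=
  let s := text
  if PySem.Str.isIn codeSwitchSymbol s then
    if useCodeSwitchData then ctuStep2A (PySem.Str.replace s codeSwitchSymbol "") charactersToKeep doubtfulSymbol useDoubtfulData
    else ""
  else ctuStep2A s charactersToKeep doubtfulSymbol useDoubtfulData

-- ===== PORT B =====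
-- `set(charactersToKeep) if charactersToKeep else set()`
def ctuKeepB (charactersToKeep : Option (List String)) : PySem.Set String :=
  match charactersToKeep with
  | some l => if l.isEmpty then [] else PySem.Set.ofList l
  | none => []

-- the one-pass loop of B: `buf` is the current word, `words` the finished words
def ctuWordsB (kb : Char → Bool) : List Char → List Char → List String → List String
  | [], buf, words => if buf.isEmpty then words else words ++ [String.ofList buf]
  | c :: rest, buf, words =>
    if kb c then ctuWordsB kb rest (buf ++ [c]) words
    else if buf.isEmpty then ctuWordsB kb rest [] words
    else ctuWordsB kb rest [] (words ++ [String.ofList buf])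

def ctuTailB (s : String) (charactersToKeep : Option (List String)) : String :=
  let keep := ctuKeepB charactersToKeep
  let kb : Char → Bool := fun c =>
    !PySem.Chars.isspace c &&
      (PySem.Set.contains keep (String.singleton c) ||
       ["Ll", "Lm", "Lo", "Lt", "Lu", "Mn", "Nd", "Nl", "No"].contains (pyCategory c))
  PySem.Str.join " " (ctuWordsB kb s.toList [] [])

def ctuStep2B (s : String) (charactersToKeep : Option (List String)) (doubtfulSymbol : String) (useDoubtfulData : Bool) : String :=
  if PySem.Str.isIn doubtfulSymbol s then
    if useDoubtfulData then ctuTailB (PySem.Str.replace s doubtfulSymbol "") charactersToKeep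
    else ""
  else ctuTailB s charactersToKeep

def clean_text_unicode_alt (text : String) (charactersToKeep : Option (List String)) (codeSwitchSymbol : String) (useCodeSwitchData : Bool) (doubtfulSymbol : String) (useDoubtfulData : Bool) : String :=
  let s := text
  if PySem.Str.isIn codeSwitchSymbol s then
    if useCodeSwitchData then ctuStep2B (PySem.Str.replace s codeSwitchSymbol "") charactersToKeep doubtfulSymbol useDoubtfulData
    else ""
  else ctuStep2B s charactersToKeep doubtfulSymbol useDoubtfulData

-- ===== PRECONDITION & SPEC =====
def Spec_clean_text_unicode (text : String) (charactersToKeep : Option (List String)) (codeSwitchSymbol : String) (useCodeSwitchData : Bool) (doubtfulSymbol : String) (useDoubtfulData : Bool) (out : String) : Prop := out = clean_text_unicode_alt text charactersToKeep codeSwitchSymbol useCodeSwitchData doubtfulSymbol useDoubtfulData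
instance (text : String) (charactersToKeep : Option (List String)) (codeSwitchSymbol : String) (useCodeSwitchData : Bool) (doubtfulSymbol : String) (useDoubtfulData : Bool) (out : String) : Decidable (Spec_clean_text_unicode text charactersToKeep codeSwitchSymbol useCodeSwitchData doubtfulSymbol useDoubtfulData out) := by unfold Spec_clean_text_unicode; infer_instance

-- ===== CLAIM (what is proved, stated in full; the proofs are below) =====
def Claim_equal_clean_text_unicode : Prop := ∀ (text : String) (charactersToKeep : Option (List String)) (codeSwitchSymbol : String) (useCodeSwitchData : Bool) (doubtfulSymbol : String) (useDoubtfulData : Bool), Dom_clean_text_unicode text charactersToKeep codeSwitchSymbol useCodeSwitchData doubtfulSymbol useDoubtfulData → Spec_clean_text_unicode text charactersToKeep codeSwitchSymbol useCodeSwitchData doubtfulSymbol useDoubtfulData (clean_text_unicode text charactersToKeep codeSwitchSymbol useCodeSwitchData doubtfulSymbol useDoubtfulData)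

-- ===== LEMMAS AND PROOFS =====

-- A's whitespace-split of the mapped string yields exactly B's word list
lemma split_go_eq_ctuWordsB (kb : Char → Bool) (f : Char → Char)
    (hf : ∀ c, (kb c = true → f c = c) ∧ PySem.Chars.isspace (f c) = !kb c) :
    ∀ (l cur : List Char) (acc : List (List Char)),
      (PySem.Chars.split₀.go (l.map f) cur acc).map String.ofList
        = ctuWordsB kb l cur.reverse (acc.reverse.map String.ofList) := by
  intro l
  induction l with
  | nil =>
    intro cur acc
    simp only [List.map_nil, PySem.Chars.split₀.go, ctuWordsB]
    by_cases h : cur = []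
    · simp [h]
    · simp [h, List.isEmpty_iff]
  | cons c rest ih =>
    intro cur acc
    rcases hf c with ⟨hfc, hsp⟩
    simp only [List.map_cons, PySem.Chars.split₀.go, hsp]
    cases hk : kb c with
    | true =>
      simp only [Bool.not_true, Bool.false_eq_true, if_false, hfc hk]
      rw [ih (c :: cur) acc]
      simp [ctuWordsB, hk]
    | false =>
      simp only [Bool.not_false, if_true]
      by_cases hc : cur = []
      · subst hc
        simp only [List.isEmpty_nil, if_true]
        rw [ih [] acc]
        simp [ctuWordsB, hk]
      · rw [if_neg (by simp [hc])]
        rw [ih [] (cur.reverse :: acc)]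
        simp [ctuWordsB, hk, hc]

lemma ctuKeepB_eq (charactersToKeep : Option (List String)) :
    ctuKeepB charactersToKeep = PySem.Set.ofList (charactersToKeep.getD []) := by
  cases charactersToKeep with
  | none => rfl
  | some l => cases l <;> rfl

lemma ctuTail_eq (s : String) (charactersToKeep : Option (List String)) :
    ctuTailA s charactersToKeep = ctuTailB s charactersToKeep := by
  simp only [ctuTailA, ctuTailB, ctuKeepB_eq]
  set kp : Char → Bool := fun c =>
    PySem.Set.contains (PySem.Set.ofList (charactersToKeep.getD [])) (String.singleton c) ||
      PySem.Set.contains (PySem.Set.ofList ["Ll", "Lm", "Lo", "Lt", "Lu", "Mn", "Nd", "Nl", "No"]) (pyCategory c)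
    with hkp
  set kb : Char → Bool := fun c =>
    !PySem.Chars.isspace c &&
      (PySem.Set.contains (PySem.Set.ofList (charactersToKeep.getD [])) (String.singleton c) ||
       ["Ll", "Lm", "Lo", "Lt", "Lu", "Mn", "Nd", "Nl", "No"].contains (pyCategory c))
    with hkb
  have hfold : (fun (ls : List Char) (c : Char) =>
      let typ := pyCategory c
      if PySem.Set.contains (PySem.Set.ofList (charactersToKeep.getD [])) (String.singleton c) ||
          PySem.Set.contains (PySem.Set.ofList ["Ll", "Lm", "Lo", "Lt", "Lu", "Mn", "Nd", "Nl", "No"]) typ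
      then ls ++ [c] else ls ++ [' '])
      = (fun ls c => ls ++ [if kp c then c else ' ']) := by
    funext ls c
    simp only [hkp]
    split <;> rfl
  rw [hfold, PySem.List.foldl_append_singleton_eq_map]
  simp only [List.nil_append]
  have htoL : (String.ofList (s.toList.map fun c => if kp c then c else ' ')).toList
      = s.toList.map fun c => if kp c then c else ' ' := by simp
  simp only [PySem.Str.split₀, htoL]
  have hkpb : ∀ c, kb c = (!PySem.Chars.isspace c && kp c) := by
    intro c
    simp only [hkb, hkp]
    have hof : PySem.Set.ofList ["Ll", "Lm", "Lo", "Lt", "Lu", "Mn", "Nd", "Nl", "No"]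
        = ["Ll", "Lm", "Lo", "Lt", "Lu", "Mn", "Nd", "Nl", "No"] := rfl
    rw [hof]; rfl
  have hf : ∀ c, (kb c = true → (fun c => if kp c then c else ' ') c = c) ∧
      PySem.Chars.isspace ((fun c => if kp c then c else ' ') c) = !kb c := by
    intro c
    rw [hkpb c]
    constructor
    · intro h
      have : kp c = true := by revert h; cases kp c <;> simp
      simp [this]
    · by_cases h : kp c = true
      · simp [h]
      · have : kp c = false := by revert h; cases kp c <;> simp
        simp [this, PySem.Chars.isspace]
  have := split_go_eq_ctuWordsB kb (fun c => if kp c then c else ' ') hf s.toList [] []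
  simp only [List.reverse_nil, List.map_nil] at this
  simp only [PySem.Chars.split₀]
  rw [this]

-- ===== VERDICT (by name: the statement is the Claim_ definition above) =====
theorem clean_text_unicode_spec : Claim_equal_clean_text_unicode := by
  intro text ck css ucs ds ud _
  unfold Spec_clean_text_unicode clean_text_unicode clean_text_unicode_alt ctuStep2A ctuStep2B
  simp only [ctuTail_eq]
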